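-- pv_equiv track=rewrite | github.com/watnoffin/Binary-Brains---Inspectron | pages/mainpage.py | get_expert_type
-- ===== SOURCE A (Python) =====
-- def get_expert_type(issue_type):
--     """Determines the type of expert needed based on the issue"""
--     issue_type = issue_type.lower()
--     if any(word in issue_type for word in ['water', 'leak', 'plumbing']):
--         return "Plumber"
--     elif any(word in issue_type for word in ['electric', 'wiring']):
--         return "Electrician"
--     elif any(word in issue_type for word in ['structur', 'foundation', 'wall', 'ceiling']):
--         return "Structural Engineer"
--     elif any(word in issue_type for word in ['roof']):
--         return "Roofing Contractor"
--     elif any(word in issue_type for word in ['mold', 'pest']):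
--         return "Environmental Specialist"
--     else:
--         return "General Contractor"
-- ===== SOURCE B (Python) =====
-- KEYWORDS = [
--     ('water', 0), ('leak', 0), ('plumbing', 0),
--     ('electric', 1), ('wiring', 1),
--     ('structur', 2), ('foundation', 2), ('wall', 2), ('ceiling', 2),
--     ('roof', 3),
--     ('mold', 4), ('pest', 4),
-- ]
-- LABELS = ["Plumber", "Electrician", "Structural Engineer",
--           "Roofing Contractor", "Environmental Specialist"]
--
-- def get_expert_type(issue_type):
--     """Single left-to-right positional sweep: at each text position record the
--     lowest-priority-index category whose keyword starts there (no substring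
--     searches); correct because a keyword occurs in the text iff it starts at
--     some position, and first-match-in-priority-order equals the minimum
--     matched category index."""
--     text = issue_type.lower()
--     best = 5
--     for i in range(len(text)):
--         for kw, cat in KEYWORDS:
--             if cat < best and text.startswith(kw, i):
--                 best = cat
--     return LABELS[best] if best < 5 else "General Contractor"
-- ===== Notes on version B (the rewrite author's own statement) =====
-- stated objective: alternative
-- what changed: Replaces the cascaded per-keyword substring-membership tests by a single left-to-right positional sweep over the lowered text that records the minimum matched category index via startswith checks at each position, picking the label at the end; correct because a keyword occurs in the text iff it starts at some position and first-match-in-priority-order equals the minimum matched category index.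
import Mathlib
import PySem

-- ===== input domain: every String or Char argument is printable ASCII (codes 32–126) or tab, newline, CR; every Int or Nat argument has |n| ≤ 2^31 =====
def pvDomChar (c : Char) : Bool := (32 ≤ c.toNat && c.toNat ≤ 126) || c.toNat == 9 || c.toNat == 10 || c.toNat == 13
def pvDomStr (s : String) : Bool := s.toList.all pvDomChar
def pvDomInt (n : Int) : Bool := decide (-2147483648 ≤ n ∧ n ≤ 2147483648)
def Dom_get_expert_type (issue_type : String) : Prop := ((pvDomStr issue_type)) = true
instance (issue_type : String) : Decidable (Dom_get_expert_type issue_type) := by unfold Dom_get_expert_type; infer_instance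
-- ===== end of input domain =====

-- B replaces A's cascaded substring tests by one positional sweep keeping the minimum matched category index (alternative).

-- ===== PORT A =====
def get_expert_type (issue_type : String) : String :=
  let it := PySem.Str.lower issue_type
  if ["water", "leak", "plumbing"].any (fun w => PySem.Str.isIn w it) then "Plumber"
  else if ["electric", "wiring"].any (fun w => PySem.Str.isIn w it) then "Electrician"
  else if ["structur", "foundation", "wall", "ceiling"].any (fun w => PySem.Str.isIn w it) then "Structural Engineer"
  else if ["roof"].any (fun w => PySem.Str.isIn w it) then "Roofing Contractor"
  else if ["mold", "pest"].any (fun w => PySem.Str.isIn w it) then "Environmental Specialist"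
  else "General Contractor"

-- ===== PORT B =====
def KEYWORDS : List (String × Nat) :=
  [("water", 0), ("leak", 0), ("plumbing", 0),
   ("electric", 1), ("wiring", 1),
   ("structur", 2), ("foundation", 2), ("wall", 2), ("ceiling", 2),
   ("roof", 3),
   ("mold", 4), ("pest", 4)]

def LABELS : List String :=
  ["Plumber", "Electrician", "Structural Engineer",
   "Roofing Contractor", "Environmental Specialist"]

def get_expert_type_alt (issue_type : String) : String :=
  let text := (PySem.Str.lower issue_type).toList
  -- Python's text.startswith(kw, i) with 0 ≤ i is exactly: kw is a prefix of text dropped at i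
  let best := (PySem.List.pyRange 0 text.length 1).foldl
      (fun best i => KEYWORDS.foldl
        (fun best kc =>
          if kc.2 < best ∧ PySem.Chars.startswith (text.drop i.toNat) kc.1.toList = true then kc.2 else best)
        best)
      5
  if best < 5 then LABELS.getD best "" else "General Contractor"

-- ===== PRECONDITION & SPEC =====
def Spec_get_expert_type (issue_type : String) (out : String) : Prop := out = get_expert_type_alt issue_type
instance (issue_type : String) (out : String) : Decidable (Spec_get_expert_type issue_type out) := by unfold Spec_get_expert_type; infer_instance

-- ===== CLAIM (what is proved, stated in full; the proofs are below) =====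
def Claim_equal_get_expert_type : Prop := ∀ (issue_type : String), Dom_get_expert_type issue_type → Spec_get_expert_type issue_type (get_expert_type issue_type)

-- ===== LEMMAS AND PROOFS =====

-- the inner step of B's sweep
def pvStep {α : Type} (c : α → Nat) (q : α → Bool) (b : Nat) (x : α) : Nat :=
  if c x < b ∧ q x = true then c x else b

lemma pvStep_le {α : Type} (c : α → Nat) (q : α → Bool) (b : Nat) (x : α) :
    pvStep c q b x ≤ b := by
  unfold pvStep; split_ifs with h
  · exact Nat.le_of_lt h.1
  · exact Nat.le_refl b

lemma pvStep_le_of (α : Type) (c : α → Nat) (q : α → Bool) (b : Nat) (x : α)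
    (hq : q x = true) : pvStep c q b x ≤ c x := by
  unfold pvStep; split_ifs with h
  · exact Nat.le_refl _
  · simp only [not_and] at h
    rcases Nat.lt_or_ge (c x) b with hlt | hge
    · exact absurd hq (h hlt)
    · exact hge

lemma pvStep_eq_or {α : Type} (c : α → Nat) (q : α → Bool) (b : Nat) (x : α) :
    pvStep c q b x = b ∨ (q x = true ∧ c x = pvStep c q b x) := by
  unfold pvStep; split_ifs with h
  · exact Or.inr ⟨h.2, rfl⟩
  · exact Or.inl rfl

-- generic facts about a fold whose step never increases the accumulator
lemma pvFoldl_le {β : Type} (g : Nat → β → Nat) (hg : ∀ b i, g b i ≤ b)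
    (l : List β) (b : Nat) : l.foldl g b ≤ b := by
  induction l generalizing b with
  | nil => exact Nat.le_refl b
  | cons x l ih => exact Nat.le_trans (ih (g b x)) (hg b x)

lemma pvFoldl_le_of_mem {β : Type} (g : Nat → β → Nat) (hg : ∀ b i, g b i ≤ b)
    (l : List β) (b : Nat) (x : β) (m : Nat) (hx : x ∈ l) (hat : ∀ b, g b x ≤ m) :
    l.foldl g b ≤ m := by
  induction l generalizing b with
  | nil => cases hx
  | cons y l ih =>
    rw [List.foldl_cons]
    rcases List.mem_cons.mp hx with rfl | hx'
    · exact Nat.le_trans (pvFoldl_le g hg l _) (hat b)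
    · exact ih _ hx'

lemma pvFoldl_eq_or {β : Type} (g : Nat → β → Nat) (P : β → Nat → Prop)
    (hg : ∀ b i, g b i = b ∨ (P i (g b i)))
    (l : List β) (b : Nat) :
    l.foldl g b = b ∨ ∃ x ∈ l, P x (l.foldl g b) := by
  induction l generalizing b with
  | nil => exact Or.inl rfl
  | cons y l ih =>
    rw [List.foldl_cons]
    rcases ih (g b y) with h | ⟨x, hx, hP⟩
    · rw [h]
      rcases hg b y with h2 | h2
      · exact Or.inl h2
      · exact Or.inr ⟨y, List.mem_cons_self, h2⟩
    · exact Or.inr ⟨x, List.mem_cons_of_mem y hx, hP⟩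

-- a (nonempty) keyword occurs somewhere in the text iff it starts at some swept position
lemma matched_iff_isIn (t : List Char) (kw : String) (h : kw.toList ≠ []) :
    (∃ i ∈ PySem.List.pyRange 0 t.length 1,
        PySem.Chars.startswith (t.drop i.toNat) kw.toList = true)
      ↔ PySem.Chars.isIn kw.toList t = true := by
  rw [← PySem.Chars.exists_prefix_drop_iff_isIn]
  constructor
  · rintro ⟨i, hi, hs⟩
    exact ⟨i.toNat, (PySem.Chars.startswith_iff _ _).mp hs⟩
  · rintro ⟨j, hj⟩
    have hjlt : j < t.length := by
      by_contra hge
      have hnil : t.drop j = [] := List.drop_eq_nil_of_le (Nat.le_of_not_lt hge)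
      rw [hnil] at hj
      exact h (List.prefix_nil.mp hj)
    refine ⟨(j : Int), ?_, ?_⟩
    · rw [PySem.List.mem_pyRange_one]
      exact ⟨Int.natCast_nonneg j, by exact_mod_cast hjlt⟩
    · simpa [PySem.Chars.startswith_iff] using hj

-- does keyword kc start at position i of t?  (Python's text.startswith(kw, i))
def pvQ (t : List Char) (i : Int) (kc : String × Nat) : Bool :=
  PySem.Chars.startswith (t.drop i.toNat) kc.1.toList

-- B's sweep, written with pvStep/pvQ (definitionally the body of get_expert_type_alt)
def pvSweep (t : List Char) : Nat :=
  (PySem.List.pyRange 0 t.length 1).foldl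
    (fun b i => KEYWORDS.foldl (pvStep (·.2) (pvQ t i)) b) 5

lemma alt_eq_sweep (s : String) :
    get_expert_type_alt s =
      (if pvSweep (PySem.Str.lower s).toList < 5
       then LABELS.getD (pvSweep (PySem.Str.lower s).toList) ""
       else "General Contractor") := rfl

lemma keyword_ne_nil (kc : String × Nat) (hkc : kc ∈ KEYWORDS) : kc.1.toList ≠ [] := by
  simp only [KEYWORDS, List.mem_cons, List.not_mem_nil, or_false] at hkc
  rcases hkc with rfl | rfl | rfl | rfl | rfl | rfl | rfl | rfl | rfl | rfl | rfl | rfl <;> decide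

lemma pvSweep_le (t : List Char) : pvSweep t ≤ 5 :=
  pvFoldl_le _ (fun b _ => pvFoldl_le _ (fun b kc => pvStep_le _ _ b kc) _ b) _ 5

lemma pvSweep_le_of (t : List Char) (kc : String × Nat) (hkc : kc ∈ KEYWORDS)
    (hin : PySem.Chars.isIn kc.1.toList t = true) : pvSweep t ≤ kc.2 := by
  obtain ⟨i, hi, hs⟩ := (matched_iff_isIn t kc.1 (keyword_ne_nil kc hkc)).mpr hin
  exact pvFoldl_le_of_mem _ (fun b i => pvFoldl_le _ (fun b kc => pvStep_le _ _ b kc) _ b)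
    _ 5 i kc.2 hi
    (fun b => pvFoldl_le_of_mem _ (fun b kc => pvStep_le _ _ b kc) _ b kc kc.2 hkc
      (fun b => pvStep_le_of _ _ _ b kc hs))

lemma pvSweep_val (t : List Char) :
    pvSweep t = 5 ∨ ∃ kc ∈ KEYWORDS, kc.2 = pvSweep t ∧ PySem.Chars.isIn kc.1.toList t = true := by
  rcases pvFoldl_eq_or _ (fun (i : Int) (v : Nat) => ∃ kc ∈ KEYWORDS, pvQ t i kc = true ∧ kc.2 = v)
      (fun b i => pvFoldl_eq_or _ (fun kc v => pvQ t i kc = true ∧ kc.2 = v)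
        (fun b kc => pvStep_eq_or _ _ b kc) KEYWORDS b)
      (PySem.List.pyRange 0 t.length 1) 5 with h | ⟨i, hi, kc, hkc, hq, hc⟩
  · exact Or.inl h
  · exact Or.inr ⟨kc, hkc, hc,
      (matched_iff_isIn t kc.1 (keyword_ne_nil kc hkc)).mp ⟨i, hi, hq⟩⟩

-- ===== VERDICT (by name: the statement is the Claim_ definition above) =====
set_option maxHeartbeats 1600000 in
theorem get_expert_type_spec : Claim_equal_get_expert_type := by
  intro issue_type _
  dsimp only [Spec_get_expert_type, get_expert_type]
  rw [alt_eq_sweep]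
  set t := (PySem.Str.lower issue_type).toList with ht
  set S := pvSweep t with hSdef
  have hIn : ∀ w : String, PySem.Str.isIn w (PySem.Str.lower issue_type)
      = PySem.Chars.isIn w.toList t := by
    intro w; simp [PySem.Str.isIn, ht, pysem]
  have hle5 : S ≤ 5 := pvSweep_le t
  have hval := pvSweep_val t
  rw [← hSdef] at hval
  by_cases h0 : PySem.Chars.isIn "water".toList t = true ∨ PySem.Chars.isIn "leak".toList t = true ∨ PySem.Chars.isIn "plumbing".toList t = true
  · have hS0 : S = 0 := Nat.le_zero.mp (by
      rcases h0 with h | h | h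
      · exact pvSweep_le_of t ("water", 0) (by decide) h
      · exact pvSweep_le_of t ("leak", 0) (by decide) h
      · exact pvSweep_le_of t ("plumbing", 0) (by decide) h)
    have hA : ["water", "leak", "plumbing"].any (fun w => PySem.Str.isIn w (PySem.Str.lower issue_type)) = true := by
      simp only [List.any_eq_true]
      rcases h0 with h | h | h
      · exact ⟨"water", by decide, by rw [hIn]; exact h⟩
      · exact ⟨"leak", by decide, by rw [hIn]; exact h⟩
      · exact ⟨"plumbing", by decide, by rw [hIn]; exact h⟩
    rw [if_pos hA, hS0]
    decide
  · have hA0 : ¬ (["water", "leak", "plumbing"].any (fun w => PySem.Str.isIn w (PySem.Str.lower issue_type)) = true) := by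
      simp only [List.any_eq_true]
      rintro ⟨w, hw, hin⟩
      rw [hIn] at hin
      fin_cases hw
      · exact h0 (Or.inl hin)
      · exact h0 (Or.inr (Or.inl hin))
      · exact h0 (Or.inr (Or.inr hin))
    have hne0 : S ≠ 0 := by
      intro hS0
      rcases hval with h | ⟨kc, hkc, hceq, hin⟩
      · omega
      · rw [hS0] at hceq
        simp only [KEYWORDS, List.mem_cons, List.not_mem_nil, or_false] at hkc
        rcases hkc with rfl | rfl | rfl | rfl | rfl | rfl | rfl | rfl | rfl | rfl | rfl | rfl <;>
          first
          | exact absurd hceq (by decide)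
          | exact h0 (Or.inl hin)
          | exact h0 (Or.inr (Or.inl hin))
          | exact h0 (Or.inr (Or.inr hin))
    rw [if_neg hA0]
    by_cases h1 : PySem.Chars.isIn "electric".toList t = true ∨ PySem.Chars.isIn "wiring".toList t = true
    · have hS1 : S = 1 := by
        have : S ≤ 1 := by
          rcases h1 with h | h
          · exact pvSweep_le_of t ("electric", 1) (by decide) h
          · exact pvSweep_le_of t ("wiring", 1) (by decide) h
        omega
      have hA : ["electric", "wiring"].any (fun w => PySem.Str.isIn w (PySem.Str.lower issue_type)) = true := by
        simp only [List.any_eq_true]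
        rcases h1 with h | h
        · exact ⟨"electric", by decide, by rw [hIn]; exact h⟩
        · exact ⟨"wiring", by decide, by rw [hIn]; exact h⟩
      rw [if_pos hA, hS1]
      decide
    · have hA1 : ¬ (["electric", "wiring"].any (fun w => PySem.Str.isIn w (PySem.Str.lower issue_type)) = true) := by
        simp only [List.any_eq_true]
        rintro ⟨w, hw, hin⟩
        rw [hIn] at hin
        fin_cases hw
        · exact h1 (Or.inl hin)
        · exact h1 (Or.inr hin)
      have hne1 : S ≠ 1 := by
        intro hS1
        rcases hval with h | ⟨kc, hkc, hceq, hin⟩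
        · omega
        · rw [hS1] at hceq
          simp only [KEYWORDS, List.mem_cons, List.not_mem_nil, or_false] at hkc
          rcases hkc with rfl | rfl | rfl | rfl | rfl | rfl | rfl | rfl | rfl | rfl | rfl | rfl <;>
            first
            | exact absurd hceq (by decide)
            | exact h1 (Or.inl hin)
            | exact h1 (Or.inr hin)
      rw [if_neg hA1]
      by_cases h2 : PySem.Chars.isIn "structur".toList t = true ∨ PySem.Chars.isIn "foundation".toList t = true ∨ PySem.Chars.isIn "wall".toList t = true ∨ PySem.Chars.isIn "ceiling".toList t = true
      · have hS2 : S = 2 := by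
          have : S ≤ 2 := by
            rcases h2 with h | h | h | h
            · exact pvSweep_le_of t ("structur", 2) (by decide) h
            · exact pvSweep_le_of t ("foundation", 2) (by decide) h
            · exact pvSweep_le_of t ("wall", 2) (by decide) h
            · exact pvSweep_le_of t ("ceiling", 2) (by decide) h
          omega
        have hA : ["structur", "foundation", "wall", "ceiling"].any (fun w => PySem.Str.isIn w (PySem.Str.lower issue_type)) = true := by
          simp only [List.any_eq_true]
          rcases h2 with h | h | h | h
          · exact ⟨"structur", by decide, by rw [hIn]; exact h⟩
          · exact ⟨"foundation", by decide, by rw [hIn]; exact h⟩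
          · exact ⟨"wall", by decide, by rw [hIn]; exact h⟩
          · exact ⟨"ceiling", by decide, by rw [hIn]; exact h⟩
        rw [if_pos hA, hS2]
        decide
      · have hA2 : ¬ (["structur", "foundation", "wall", "ceiling"].any (fun w => PySem.Str.isIn w (PySem.Str.lower issue_type)) = true) := by
          simp only [List.any_eq_true]
          rintro ⟨w, hw, hin⟩
          rw [hIn] at hin
          fin_cases hw
          · exact h2 (Or.inl hin)
          · exact h2 (Or.inr (Or.inl hin))
          · exact h2 (Or.inr (Or.inr (Or.inl hin)))
          · exact h2 (Or.inr (Or.inr (Or.inr hin)))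
        have hne2 : S ≠ 2 := by
          intro hS2
          rcases hval with h | ⟨kc, hkc, hceq, hin⟩
          · omega
          · rw [hS2] at hceq
            simp only [KEYWORDS, List.mem_cons, List.not_mem_nil, or_false] at hkc
            rcases hkc with rfl | rfl | rfl | rfl | rfl | rfl | rfl | rfl | rfl | rfl | rfl | rfl <;>
              first
              | exact absurd hceq (by decide)
              | exact h2 (Or.inl hin)
              | exact h2 (Or.inr (Or.inl hin))
              | exact h2 (Or.inr (Or.inr (Or.inl hin)))
              | exact h2 (Or.inr (Or.inr (Or.inr hin)))
        rw [if_neg hA2]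
        by_cases h3 : PySem.Chars.isIn "roof".toList t = true
        · have hS3 : S = 3 := by
            have : S ≤ 3 := pvSweep_le_of t ("roof", 3) (by decide) h3
            omega
          have hA : ["roof"].any (fun w => PySem.Str.isIn w (PySem.Str.lower issue_type)) = true := by
            simp only [List.any_eq_true]
            exact ⟨"roof", by decide, by rw [hIn]; exact h3⟩
          rw [if_pos hA, hS3]
          decide
        · have hA3 : ¬ (["roof"].any (fun w => PySem.Str.isIn w (PySem.Str.lower issue_type)) = true) := by
            simp only [List.any_eq_true]
            rintro ⟨w, hw, hin⟩
            rw [hIn] at hin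
            fin_cases hw
            exact h3 hin
          have hne3 : S ≠ 3 := by
            intro hS3
            rcases hval with h | ⟨kc, hkc, hceq, hin⟩
            · omega
            · rw [hS3] at hceq
              simp only [KEYWORDS, List.mem_cons, List.not_mem_nil, or_false] at hkc
              rcases hkc with rfl | rfl | rfl | rfl | rfl | rfl | rfl | rfl | rfl | rfl | rfl | rfl <;>
                first
                | exact absurd hceq (by decide)
                | exact h3 hin
          rw [if_neg hA3]
          by_cases h4 : PySem.Chars.isIn "mold".toList t = true ∨ PySem.Chars.isIn "pest".toList t = true
          · have hS4 : S = 4 := by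
              have : S ≤ 4 := by
                rcases h4 with h | h
                · exact pvSweep_le_of t ("mold", 4) (by decide) h
                · exact pvSweep_le_of t ("pest", 4) (by decide) h
              omega
            have hA : ["mold", "pest"].any (fun w => PySem.Str.isIn w (PySem.Str.lower issue_type)) = true := by
              simp only [List.any_eq_true]
              rcases h4 with h | h
              · exact ⟨"mold", by decide, by rw [hIn]; exact h⟩
              · exact ⟨"pest", by decide, by rw [hIn]; exact h⟩
            rw [if_pos hA, hS4]
            decide
          · have hA4 : ¬ (["mold", "pest"].any (fun w => PySem.Str.isIn w (PySem.Str.lower issue_type)) = true) := by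
              simp only [List.any_eq_true]
              rintro ⟨w, hw, hin⟩
              rw [hIn] at hin
              fin_cases hw
              · exact h4 (Or.inl hin)
              · exact h4 (Or.inr hin)
            have hne4 : S ≠ 4 := by
              intro hS4
              rcases hval with h | ⟨kc, hkc, hceq, hin⟩
              · omega
              · rw [hS4] at hceq
                simp only [KEYWORDS, List.mem_cons, List.not_mem_nil, or_false] at hkc
                rcases hkc with rfl | rfl | rfl | rfl | rfl | rfl | rfl | rfl | rfl | rfl | rfl | rfl <;>
                  first
                  | exact absurd hceq (by decide)
                  | exact h4 (Or.inl hin)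
                  | exact h4 (Or.inr hin)
            rw [if_neg hA4]
            have hS5 : S = 5 := by omega
            rw [hS5]
            decide
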